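-- pv_equiv track=rewrite | github.com/jjoshua2/arc_agi | unsolved/2025-10-11T21-09-39Z/a8d7556c_best1.py | transform
-- ===== SOURCE A (Python) =====
-- def transform(grid: list[list[int]]) -> list[list[int]]:
--     if not grid or not grid[0]:
--         return []
--     rows = len(grid)
--     cols = len(grid[0])
--     result = [row[:] for row in grid]
--     for r in range(rows):
--         for c in range(cols):
--             if grid[r][c] != 0:
--                 continue
--             filled = False
--             for dr in [0, -1]:
--                 for dc in [0, -1]:
--                     tr = r + dr
--                     tc = c + dc
--                     if tr < 0 or tc < 0 or tr + 1 >= rows or tc + 1 >= cols: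
--                         continue
--                     all_zero = True
--                     for i in range(2):
--                         for j in range(2):
--                             if grid[tr + i][tc + j] != 0:
--                                 all_zero = False
--                                 break
--                         if not all_zero:
--                             break
--                     if all_zero:
--                         filled = True
--                         break
--                 if filled:
--                     break
--             if filled:
--                 result[r][c] = 2
--     return result
-- ===== SOURCE B (Python) =====
-- def transform(grid: list[list[int]]) -> list[list[int]]:
--     if not grid or not grid[0]:
--         return []
--     rows = len(grid)
--     cols = len(grid[0])
--     tops = {(r, c) for r in range(rows - 1) for c in range(cols - 1)
--             if grid[r][c] == grid[r][c + 1] == grid[r + 1][c] == grid[r + 1][c + 1] == 0}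
--     return [[2 if ((r, c) in tops or (r, c - 1) in tops or
--                    (r - 1, c) in tops or (r - 1, c - 1) in tops) else v
--              for c, v in enumerate(row)]
--             for r, row in enumerate(grid)]
-- ===== Notes on version B (the rewrite author's own statement) =====
-- stated objective: simpler
-- what changed: A scans every cell and, per zero cell, probes up to four candidate 2x2 blocks with nested break-flag loops and an inner 2x2 verification loop; B instead precomputes the set of top-left corners of all-zero 2x2 blocks in one pass over block positions and then builds the output as a pure nested comprehension that paints a cell 2 iff one of its four enclosing positions is in that set.
import Mathlib
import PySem

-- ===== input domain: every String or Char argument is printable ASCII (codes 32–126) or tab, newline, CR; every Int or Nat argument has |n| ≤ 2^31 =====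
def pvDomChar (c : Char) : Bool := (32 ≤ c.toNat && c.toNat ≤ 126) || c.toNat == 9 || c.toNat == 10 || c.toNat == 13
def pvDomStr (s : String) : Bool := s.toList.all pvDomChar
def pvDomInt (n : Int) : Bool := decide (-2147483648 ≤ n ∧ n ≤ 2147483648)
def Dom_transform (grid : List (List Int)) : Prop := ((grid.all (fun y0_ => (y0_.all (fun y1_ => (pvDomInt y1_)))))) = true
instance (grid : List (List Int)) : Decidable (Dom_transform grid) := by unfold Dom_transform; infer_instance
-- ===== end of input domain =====

-- B precomputes the set of top-left corners of all-zero 2x2 blocks and builds the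
-- output as a pure nested map, instead of A's per-cell candidate probing with break flags.

-- shared cell accessor: grid[r][c] for in-range nonnegative indices (Pre_ keeps them in range)
def gget (grid : List (List Int)) (r c : Nat) : Int := (grid.getD r []).getD c 0

-- ===== PORT A =====
def ggetI (grid : List (List Int)) (r c : Int) : Int := gget grid r.toNat c.toNat

def allZeroA (grid : List (List Int)) (tr tc : Int) : Bool :=
  (List.range 2).all fun i => (List.range 2).all fun j => ggetI grid (tr + i) (tc + j) == 0

def filledA (grid : List (List Int)) (rows cols : Nat) (r c : Nat) : Bool :=
  ([0, -1] : List Int).any fun dr => ([0, -1] : List Int).any fun dc =>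
    if (r : Int) + dr < 0 ∨ (c : Int) + dc < 0 ∨ (r : Int) + dr + 1 ≥ (rows : Int) ∨
        (c : Int) + dc + 1 ≥ (cols : Int) then false
    else allZeroA grid ((r : Int) + dr) ((c : Int) + dc)

def transform (grid : List (List Int)) : List (List Int) :=
  if grid = [] ∨ grid.headD [] = [] then []
  else
    let rows := grid.length
    let cols := (grid.headD []).length
    let result := grid.map (fun row => row)
    (List.range rows).foldl (fun result r =>
      (List.range cols).foldl (fun result c =>
        if gget grid r c ≠ 0 then result
        else if filledA grid rows cols r c then result.modify r (fun row => row.set c 2)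
        else result) result) result

-- ===== PORT B =====
def blockZero (grid : List (List Int)) (r c : Nat) : Bool :=
  gget grid r c == 0 && gget grid r (c + 1) == 0 &&
  gget grid (r + 1) c == 0 && gget grid (r + 1) (c + 1) == 0

def topsB (grid : List (List Int)) : List (Int × Int) :=
  (List.range (grid.length - 1)).flatMap fun r =>
    (List.range ((grid.headD []).length - 1)).filterMap fun c =>
      if blockZero grid r c then some ((r : Int), (c : Int)) else none

def transform_alt (grid : List (List Int)) : List (List Int) :=
  if grid = [] ∨ grid.headD [] = [] then []
  else
    let tops : PySem.Set (Int × Int) := PySem.Set.ofList (topsB grid)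
    (PySem.List.enumerate grid 0).map fun p =>
      (PySem.List.enumerate p.2 0).map fun q =>
        if PySem.Set.contains tops (p.1, q.1) || PySem.Set.contains tops (p.1, q.1 - 1) ||
           PySem.Set.contains tops (p.1 - 1, q.1) || PySem.Set.contains tops (p.1 - 1, q.1 - 1)
        then 2 else q.2

-- ===== PRECONDITION & SPEC =====
-- Pre_ excludes ragged grids with a row shorter than the first row: there A raises IndexError.
def Pre_transform (grid : List (List Int)) : Prop :=
  ∀ row ∈ grid, (grid.headD []).length ≤ row.length
instance (grid : List (List Int)) : Decidable (Pre_transform grid) := by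
  unfold Pre_transform; infer_instance

def pvWitness_transform : List (List Int) := [[0, 0, 1], [0, 0, 2]]

def Spec_transform (grid : List (List Int)) (out : List (List Int)) : Prop := out = transform_alt grid
instance (grid : List (List Int)) (out : List (List Int)) : Decidable (Spec_transform grid out) := by
  unfold Spec_transform; infer_instance

-- ===== CLAIM (what is proved, stated in full; the proofs are below) =====
def Claim_equal_transform : Prop :=
  ∀ (grid : List (List Int)), Dom_transform grid → Pre_transform grid →
    Spec_transform grid (transform grid)

-- ===== LEMMAS AND PROOFS =====

-- the per-cell condition under which A paints a 2
def condA (grid : List (List Int)) (r c : Nat) : Bool :=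
  gget grid r c == 0 && filledA grid grid.length (grid.headD []).length r c

theorem condA_bounds {grid : List (List Int)} {r c : Nat} (h : condA grid r c = true) :
    r < grid.length ∧ c < (grid.headD []).length := by
  unfold condA filledA at h
  simp only [Bool.and_eq_true, List.any_eq_true, List.mem_cons, List.not_mem_nil, or_false] at h
  obtain ⟨-, dr, hdr, dc, hdc, hb⟩ := h
  by_cases hc : ((r : Int) + dr < 0 ∨ (c : Int) + dc < 0 ∨
      (r : Int) + dr + 1 ≥ (grid.length : Int) ∨
      (c : Int) + dc + 1 ≥ ((grid.headD []).length : Int))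
  · rw [if_pos hc] at hb; cases hb
  · push_neg at hc
    obtain ⟨h1, h2, h3, h4⟩ := hc
    rcases hdr with rfl | rfl <;> rcases hdc with rfl | rfl <;> constructor <;> omega

theorem pre_row {grid : List (List Int)} (hpre : Pre_transform grid) {i : Nat}
    (hi : i < grid.length) : (grid.headD []).length ≤ (grid.getD i []).length := by
  rw [List.getD_eq_getElem grid [] hi]
  exact hpre _ (List.getElem_mem hi)

theorem gget_eq {xs : List (List Int)} {i j : Nat} (hi : i < xs.length)
    (hj : j < (xs[i]'hi).length) : gget xs i j = (xs[i]'hi)[j]'hj := by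
  unfold gget
  rw [List.getD_eq_getElem xs [] hi, List.getD_eq_getElem _ 0 hj]

theorem gget_paint (res : List (List Int)) (r c i j : Nat) :
    gget (res.modify r (fun row => row.set c 2)) i j =
      if i = r ∧ j = c ∧ r < res.length ∧ c < (res.getD r []).length then 2
      else gget res i j := by
  unfold gget
  simp only [List.getD_eq_getElem?_getD, List.getElem?_modify]
  by_cases hir : i = r
  · subst hir
    by_cases hi : i < res.length
    · have hres : res[i]? = some (res[i]'hi) := List.getElem?_eq_getElem hi
      rw [hres]
      simp only [Option.getD_some]
      have hrowD : (res.getD i []) = res[i]'hi := List.getD_eq_getElem res [] hi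
      rw [hrowD] at *
      by_cases hjc : j = c
      · subst hjc
        by_cases hcl : j < (res[i]'hi).length
        · simp [hcl, hi]
        · simp [hcl, hi]
      · have hcj : c ≠ j := fun h => hjc (Eq.symm h)
        simp [hcj, hjc]
    · have hres : res[i]? = none := by
        rw [List.getElem?_eq_none_iff]; omega
      rw [hres]
      simp [hi]
  · have : r ≠ i := fun h => hir h.symm
    simp [this, hir]

theorem rowlen_paint (res : List (List Int)) (r c i : Nat) :
    ((res.modify r (fun row => row.set c 2)).getD i []).length = (res.getD i []).length := by
  simp only [List.getD_eq_getElem?_getD, List.getElem?_modify]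
  cases hres : res[i]? with
  | none => simp
  | some row => by_cases h : r = i <;> simp [h]

theorem innerA_char (grid : List (List Int)) (hpre : Pre_transform grid) (r : Nat) (k : Nat)
    (res : List (List Int)) (hlen : res.length = grid.length)
    (hrow : ∀ i, (res.getD i []).length = (grid.getD i []).length) :
    ((List.range k).foldl (fun result c =>
        if gget grid r c ≠ 0 then result
        else if filledA grid grid.length (grid.headD []).length r c then
          result.modify r (fun row => row.set c 2)
        else result) res).length = grid.length ∧
    (∀ i, (((List.range k).foldl (fun result c =>
        if gget grid r c ≠ 0 then result
        else if filledA grid grid.length (grid.headD []).length r c then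
          result.modify r (fun row => row.set c 2)
        else result) res).getD i []).length = (grid.getD i []).length) ∧
    (∀ i j, gget ((List.range k).foldl (fun result c =>
        if gget grid r c ≠ 0 then result
        else if filledA grid grid.length (grid.headD []).length r c then
          result.modify r (fun row => row.set c 2)
        else result) res) i j =
      if i = r ∧ j < k ∧ condA grid r j = true then 2 else gget res i j) := by
  induction k with
  | zero =>
    refine ⟨hlen, hrow, fun i j => ?_⟩
    simp
  | succ k ih =>
    obtain ⟨ih1, ih2, ih3⟩ := ih
    rw [List.range_succ, List.foldl_append, List.foldl_cons, List.foldl_nil]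
    by_cases h0 : gget grid r k ≠ 0
    · rw [if_pos h0]
      have hc : condA grid r k = false := by
        simp [condA, h0]
      refine ⟨ih1, ih2, fun i j => ?_⟩
      rw [ih3 i j]
      by_cases hj : j = k
      · subst hj
        simp [hc]
      · have : (i = r ∧ j < k + 1 ∧ condA grid r j = true) ↔
            (i = r ∧ j < k ∧ condA grid r j = true) := by
          constructor <;> rintro ⟨ha, hb, hcc⟩ <;> exact ⟨ha, by omega, hcc⟩
        rw [if_congr this rfl rfl]
    · rw [if_neg h0]
      push_neg at h0
      by_cases hf : filledA grid grid.length (grid.headD []).length r k = true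
      · rw [if_pos hf]
        have hcA : condA grid r k = true := by
          unfold condA
          rw [hf]
          simp [h0]
        obtain ⟨hrk, hck⟩ := condA_bounds hcA
        refine ⟨?_, ?_, ?_⟩
        · rw [List.length_modify, ih1]
        · intro i; rw [rowlen_paint, ih2]
        · intro i j
          rw [gget_paint, ih3 i j]
          have hb2 : k < (((List.range k).foldl (fun result c =>
              if gget grid r c ≠ 0 then result
              else if filledA grid grid.length (grid.headD []).length r c then
                result.modify r (fun row => row.set c 2)
              else result) res).getD r []).length := by
            rw [ih2 r]
            exact lt_of_lt_of_le hck (pre_row hpre hrk)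
          by_cases hir : i = r
          · subst hir
            by_cases hjk : j = k
            · subst hjk
              rw [if_pos ⟨rfl, rfl, by rw [ih1]; exact hrk, hb2⟩]
              rw [if_pos ⟨rfl, by omega, hcA⟩]
            · rw [if_neg (show ¬ _ by rintro ⟨-, h, -, -⟩; exact hjk h)]
              by_cases hjlt : j < k
              · rw [if_congr (show (i = i ∧ j < k ∧ condA grid i j = true) ↔
                    (i = i ∧ j < k + 1 ∧ condA grid i j = true) from
                    ⟨fun ⟨a, b, c⟩ => ⟨a, by omega, c⟩, fun ⟨a, b, c⟩ => ⟨a, by omega, c⟩⟩) rfl rfl]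
              · have g1 : ¬ (i = i ∧ j < k ∧ condA grid i j = true) := fun h => hjlt h.2.1
                have g2 : ¬ (i = i ∧ j < k + 1 ∧ condA grid i j = true) := by
                  rintro ⟨-, hh, -⟩; omega
                rw [if_neg g1, if_neg g2]
          · rw [if_neg (show ¬ _ by rintro ⟨h, -⟩; exact hir h),
              if_neg (show ¬ (i = r ∧ j < k ∧ condA grid r j = true) from fun h => hir h.1),
              if_neg (show ¬ (i = r ∧ j < k + 1 ∧ condA grid r j = true) from fun h => hir h.1)]
      · rw [if_neg hf]
        have hc : condA grid r k = false := by
          unfold condA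
          rw [Bool.eq_false_iff.mpr hf, Bool.and_false]
        refine ⟨ih1, ih2, fun i j => ?_⟩
        rw [ih3 i j]
        by_cases hj : j = k
        · subst hj
          simp [hc]
        · have : (i = r ∧ j < k + 1 ∧ condA grid r j = true) ↔
              (i = r ∧ j < k ∧ condA grid r j = true) := by
            constructor <;> rintro ⟨ha, hb, hcc⟩ <;> exact ⟨ha, by omega, hcc⟩
          rw [if_congr this rfl rfl]

theorem outerA_char (grid : List (List Int)) (hpre : Pre_transform grid) (k : Nat)
    (res : List (List Int)) (hlen : res.length = grid.length)
    (hrow : ∀ i, (res.getD i []).length = (grid.getD i []).length) :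
    ((List.range k).foldl (fun result r =>
      (List.range (grid.headD []).length).foldl (fun result c =>
        if gget grid r c ≠ 0 then result
        else if filledA grid grid.length (grid.headD []).length r c then
          result.modify r (fun row => row.set c 2)
        else result) result) res).length = grid.length ∧
    (∀ i, (((List.range k).foldl (fun result r =>
      (List.range (grid.headD []).length).foldl (fun result c =>
        if gget grid r c ≠ 0 then result
        else if filledA grid grid.length (grid.headD []).length r c then
          result.modify r (fun row => row.set c 2)
        else result) result) res).getD i []).length = (grid.getD i []).length) ∧
    (∀ i j, gget ((List.range k).foldl (fun result r =>
      (List.range (grid.headD []).length).foldl (fun result c =>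
        if gget grid r c ≠ 0 then result
        else if filledA grid grid.length (grid.headD []).length r c then
          result.modify r (fun row => row.set c 2)
        else result) result) res) i j =
      if i < k ∧ condA grid i j = true then 2 else gget res i j) := by
  induction k with
  | zero =>
    refine ⟨hlen, hrow, fun i j => ?_⟩
    simp
  | succ k ih =>
    obtain ⟨ih1, ih2, ih3⟩ := ih
    rw [List.range_succ, List.foldl_append, List.foldl_cons, List.foldl_nil]
    obtain ⟨j1, j2, j3⟩ := innerA_char grid hpre k (grid.headD []).length _ ih1 ih2
    refine ⟨j1, j2, fun i j => ?_⟩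
    rw [j3 i j, ih3 i j]
    by_cases hik : i = k
    · subst hik
      by_cases hcj : condA grid i j = true
      · have hjm : j < (grid.headD []).length := (condA_bounds hcj).2
        rw [if_pos ⟨rfl, hjm, hcj⟩, if_pos ⟨by omega, hcj⟩]
      · have g1 : ¬ (i = i ∧ j < (grid.headD []).length ∧ condA grid i j = true) :=
          fun h => hcj h.2.2
        have g2 : ¬ (i < i ∧ condA grid i j = true) := fun h => by omega
        have g3 : ¬ (i < i + 1 ∧ condA grid i j = true) := fun h => hcj h.2
        rw [if_neg g1, if_neg g2, if_neg g3]
    · have g1 : ¬ (i = k ∧ j < (grid.headD []).length ∧ condA grid k j = true) :=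
        fun h => hik h.1
      rw [if_neg g1]
      by_cases h2 : i < k ∧ condA grid i j = true
      · rw [if_pos h2, if_pos ⟨by omega, h2.2⟩]
      · have g3 : ¬ (i < k + 1 ∧ condA grid i j = true) := by
          rintro ⟨hh1, hh2⟩
          exact h2 ⟨by omega, hh2⟩
        rw [if_neg h2, if_neg g3]

theorem mem_topsB {grid : List (List Int)} {p : Int × Int} :
    p ∈ topsB grid ↔ ∃ r c : Nat, r < grid.length - 1 ∧ c < (grid.headD []).length - 1 ∧
      blockZero grid r c = true ∧ p = ((r : Int), (c : Int)) := by
  unfold topsB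
  simp only [List.mem_flatMap, List.mem_filterMap, List.mem_range]
  constructor
  · rintro ⟨r, hr, c, hc, hif⟩
    by_cases hbz : blockZero grid r c = true
    · rw [if_pos hbz] at hif
      exact ⟨r, c, hr, hc, hbz, (Option.some.injEq _ _ ▸ hif).symm⟩
    · rw [if_neg hbz] at hif; cases hif
  · rintro ⟨r, c, hr, hc, hbz, rfl⟩
    exact ⟨r, hr, c, hc, by rw [if_pos hbz]⟩

theorem allZeroA_eq_blockZero (grid : List (List Int)) (tr tc : Int) (htr : 0 ≤ tr) (htc : 0 ≤ tc) :
    allZeroA grid tr tc = blockZero grid tr.toNat tc.toNat := by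
  have a1 : (tr + 1).toNat = tr.toNat + 1 := by omega
  have b1 : (tc + 1).toNat = tc.toNat + 1 := by omega
  unfold allZeroA blockZero ggetI
  rw [show List.range 2 = [0, 1] from rfl, Bool.eq_iff_iff]
  simp only [List.all_cons, List.all_nil, Nat.cast_zero, Nat.cast_one, add_zero,
    Bool.and_true, Bool.and_eq_true, beq_iff_eq, a1, b1]
  tauto

-- B's per-cell paint test (as it appears in transform_alt) agrees with A's condition
theorem cond_equiv (grid : List (List Int)) (i j : Nat) (hi : i < grid.length) :
    ((PySem.Set.contains (PySem.Set.ofList (topsB grid)) ((i : Int), (j : Int)) ||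
      PySem.Set.contains (PySem.Set.ofList (topsB grid)) ((i : Int), (j : Int) - 1) ||
      PySem.Set.contains (PySem.Set.ofList (topsB grid)) ((i : Int) - 1, (j : Int)) ||
      PySem.Set.contains (PySem.Set.ofList (topsB grid)) ((i : Int) - 1, (j : Int) - 1)) = true) ↔
    condA grid i j = true := by
  have hmem : ∀ x y : Int, (PySem.Set.contains (PySem.Set.ofList (topsB grid)) (x, y) = true) ↔
      ∃ r c : Nat, r < grid.length - 1 ∧ c < (grid.headD []).length - 1 ∧
        blockZero grid r c = true ∧ x = (r : Int) ∧ y = (c : Int) := by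
    intro x y
    rw [PySem.Set.contains_iff, PySem.Set.mem_ofList, mem_topsB]
    constructor
    · rintro ⟨r, c, h1, h2, h3, h4⟩
      injection h4 with hx hy
      exact ⟨r, c, h1, h2, h3, hx, hy⟩
    · rintro ⟨r, c, h1, h2, h3, rfl, rfl⟩
      exact ⟨r, c, h1, h2, h3, rfl⟩
  have build : ∀ (r c : Nat) (dr dc : Int), (dr = 0 ∨ dr = -1) → (dc = 0 ∨ dc = -1) →
      r < grid.length - 1 → c < (grid.headD []).length - 1 → blockZero grid r c = true →
      (i : Int) + dr = (r : Int) → (j : Int) + dc = (c : Int) → condA grid i j = true := by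
    intro r c dr dc hdr hdc h1 h2 h3 hr hc
    unfold condA
    simp only [Bool.and_eq_true]
    refine ⟨?_, ?_⟩
    · have hbz := h3
      unfold blockZero at hbz
      simp only [Bool.and_eq_true, beq_iff_eq] at hbz
      obtain ⟨⟨⟨z00, z01⟩, z10⟩, z11⟩ := hbz
      refine beq_iff_eq.mpr ?_
      rcases hdr with rfl | rfl <;> rcases hdc with rfl | rfl
      · rw [show i = r from by omega, show j = c from by omega]; exact z00
      · rw [show i = r from by omega, show j = c + 1 from by omega]; exact z01
      · rw [show i = r + 1 from by omega, show j = c from by omega]; exact z10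
      · rw [show i = r + 1 from by omega, show j = c + 1 from by omega]; exact z11
    · unfold filledA
      refine List.any_eq_true.mpr ⟨dr, ?_, List.any_eq_true.mpr ⟨dc, ?_, ?_⟩⟩
      · rcases hdr with rfl | rfl <;> simp
      · rcases hdc with rfl | rfl <;> simp
      · have hcond : ¬ ((i : Int) + dr < 0 ∨ (j : Int) + dc < 0 ∨
            (i : Int) + dr + 1 ≥ (grid.length : Int) ∨
            (j : Int) + dc + 1 ≥ ((grid.headD []).length : Int)) := by
          push_neg
          refine ⟨by omega, by omega, by omega, by omega⟩
        rw [if_neg hcond, allZeroA_eq_blockZero _ _ _ (by omega) (by omega),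
          show ((i : Int) + dr).toNat = r from by omega,
          show ((j : Int) + dc).toNat = c from by omega]
        exact h3
  simp only [Bool.or_eq_true, hmem]
  constructor
  · rintro (((⟨r, c, h1, h2, h3, hx, hy⟩ | ⟨r, c, h1, h2, h3, hx, hy⟩) |
      ⟨r, c, h1, h2, h3, hx, hy⟩) | ⟨r, c, h1, h2, h3, hx, hy⟩)
    · exact build r c 0 0 (Or.inl rfl) (Or.inl rfl) h1 h2 h3 (by omega) (by omega)
    · exact build r c 0 (-1) (Or.inl rfl) (Or.inr rfl) h1 h2 h3 (by omega) (by omega)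
    · exact build r c (-1) 0 (Or.inr rfl) (Or.inl rfl) h1 h2 h3 (by omega) (by omega)
    · exact build r c (-1) (-1) (Or.inr rfl) (Or.inr rfl) h1 h2 h3 (by omega) (by omega)
  · intro h
    unfold condA filledA at h
    simp only [Bool.and_eq_true, List.any_eq_true, List.mem_cons, List.not_mem_nil,
      or_false] at h
    obtain ⟨-, dr, hdr, dc, hdc, hb⟩ := h
    by_cases hcond : ((i : Int) + dr < 0 ∨ (j : Int) + dc < 0 ∨
        (i : Int) + dr + 1 ≥ (grid.length : Int) ∨
        (j : Int) + dc + 1 ≥ ((grid.headD []).length : Int))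
    · rw [if_pos hcond] at hb; cases hb
    · rw [if_neg hcond] at hb
      push_neg at hcond
      obtain ⟨b1, b2, b3, b4⟩ := hcond
      rw [allZeroA_eq_blockZero _ _ _ b1 b2] at hb
      rcases hdr with rfl | rfl <;> rcases hdc with rfl | rfl
      · exact Or.inl (Or.inl (Or.inl ⟨_, _, by omega, by omega, hb, by omega, by omega⟩))
      · exact Or.inl (Or.inl (Or.inr ⟨_, _, by omega, by omega, hb, by omega, by omega⟩))
      · exact Or.inl (Or.inr ⟨_, _, by omega, by omega, hb, by omega, by omega⟩)
      · exact Or.inr ⟨_, _, by omega, by omega, hb, by omega, by omega⟩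

theorem transformA_char (grid : List (List Int)) (hpre : Pre_transform grid)
    (hne : ¬(grid = [] ∨ grid.headD [] = [])) :
    (transform grid).length = grid.length ∧
    (∀ i, ((transform grid).getD i []).length = (grid.getD i []).length) ∧
    (∀ i j, gget (transform grid) i j =
      if i < grid.length ∧ condA grid i j = true then 2 else gget grid i j) := by
  have he : transform grid = (List.range grid.length).foldl (fun result r =>
      (List.range (grid.headD []).length).foldl (fun result c =>
        if gget grid r c ≠ 0 then result
        else if filledA grid grid.length (grid.headD []).length r c then
          result.modify r (fun row => row.set c 2)
        else result) result) grid := by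
    simp only [transform, if_neg hne, List.map_id']
  rw [he]
  exact outerA_char grid hpre grid.length grid rfl (fun i => rfl)

theorem transformB_char (grid : List (List Int)) (hne : ¬(grid = [] ∨ grid.headD [] = [])) :
    (transform_alt grid).length = grid.length ∧
    (∀ i (hi : i < grid.length), ((transform_alt grid).getD i []).length =
      (grid[i]'hi).length) ∧
    (∀ i j (hi : i < grid.length) (hj : j < (grid[i]'hi).length),
      gget (transform_alt grid) i j =
        if (PySem.Set.contains (PySem.Set.ofList (topsB grid)) ((i : Int), (j : Int)) ||
            PySem.Set.contains (PySem.Set.ofList (topsB grid)) ((i : Int), (j : Int) - 1) ||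
            PySem.Set.contains (PySem.Set.ofList (topsB grid)) ((i : Int) - 1, (j : Int)) ||
            PySem.Set.contains (PySem.Set.ofList (topsB grid)) ((i : Int) - 1, (j : Int) - 1))
        then 2 else (grid[i]'hi)[j]'hj) := by
  have he : transform_alt grid = (PySem.List.enumerate grid 0).map fun p =>
      (PySem.List.enumerate p.2 0).map fun q =>
        if PySem.Set.contains (PySem.Set.ofList (topsB grid)) (p.1, q.1) ||
           PySem.Set.contains (PySem.Set.ofList (topsB grid)) (p.1, q.1 - 1) ||
           PySem.Set.contains (PySem.Set.ofList (topsB grid)) (p.1 - 1, q.1) ||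
           PySem.Set.contains (PySem.Set.ofList (topsB grid)) (p.1 - 1, q.1 - 1)
        then 2 else q.2 := by
    simp only [transform_alt, if_neg hne]
  have hlen : (transform_alt grid).length = grid.length := by
    rw [he, List.length_map, PySem.List.length_enumerate]
  have hrowe : ∀ i (hi : i < grid.length), (transform_alt grid)[i]'(by rw [hlen]; exact hi) =
      (PySem.List.enumerate (grid[i]'hi) 0).map fun q =>
        if PySem.Set.contains (PySem.Set.ofList (topsB grid)) ((i : Int), q.1) ||
           PySem.Set.contains (PySem.Set.ofList (topsB grid)) ((i : Int), q.1 - 1) ||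
           PySem.Set.contains (PySem.Set.ofList (topsB grid)) ((i : Int) - 1, q.1) ||
           PySem.Set.contains (PySem.Set.ofList (topsB grid)) ((i : Int) - 1, q.1 - 1)
        then 2 else q.2 := by
    intro i hi
    have hi' : i < (PySem.List.enumerate grid 0).length := by
      rw [PySem.List.length_enumerate]; exact hi
    simp only [he, List.getElem_map, PySem.List.getElem_enumerate, zero_add]
  refine ⟨hlen, ?_, ?_⟩
  · intro i hi
    rw [List.getD_eq_getElem _ [] (by rw [hlen]; exact hi), hrowe i hi,
      List.length_map, PySem.List.length_enumerate]
  · intro i j hi hj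
    have hi2 : i < (transform_alt grid).length := by rw [hlen]; exact hi
    have hj2 : j < ((transform_alt grid)[i]'hi2).length := by
      rw [hrowe i hi, List.length_map, PySem.List.length_enumerate]; exact hj
    rw [gget_eq hi2 hj2]
    have hj3 : j < (PySem.List.enumerate (grid[i]'hi) 0).length := by
      rw [PySem.List.length_enumerate]; exact hj
    simp only [hrowe i hi, List.getElem_map, PySem.List.getElem_enumerate, zero_add]

-- ===== VERDICT (by name: the statement is the Claim_ definition above) =====
theorem transform_spec : Claim_equal_transform := by
  intro grid _ hpre
  unfold Spec_transform
  by_cases hne : grid = [] ∨ grid.headD [] = []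
  · simp only [transform, transform_alt, if_pos hne]
  · obtain ⟨aL, aR, aC⟩ := transformA_char grid hpre hne
    obtain ⟨bL, bR, bC⟩ := transformB_char grid hne
    apply List.ext_getElem (by rw [aL, bL])
    intro i h1 h2
    have hi : i < grid.length := by rwa [aL] at h1
    apply List.ext_getElem
    · rw [← List.getD_eq_getElem _ [] h1, ← List.getD_eq_getElem _ [] h2, aR i, bR i hi,
        List.getD_eq_getElem _ [] hi]
    · intro j hj1 hj2
      have hjg : j < (grid[i]'hi).length := by
        have := bR i hi
        rw [List.getD_eq_getElem _ [] h2] at this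
        rwa [this] at hj2
      rw [← gget_eq h1 hj1, ← gget_eq h2 hj2, aC i j, bC i j hi hjg]
      rw [gget_eq hi hjg]
      by_cases hq : condA grid i j = true
      · rw [if_pos ⟨hi, hq⟩, if_pos ((cond_equiv grid i j hi).mpr hq)]
      · rw [if_neg (fun h => hq h.2),
          if_neg (fun h => hq ((cond_equiv grid i j hi).mp h))]
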